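-- pv_equiv track=rewrite | github.com/Waino/morfessor-cognates | morfessorcognate/cognate.py | merge_consecutive_edits
-- ===== SOURCE A (Python) =====
-- def merge_consecutive_edits(edits):
--     pop, pib, pie, pjb, pje = None, None, None, None, None
--     for op, ib, ie, jb, je in edits:
--         if ib == pie and jb == pje:
--             pop = 'replace'
--             pie = ie
--             pje = je
--             continue
--         else:
--             if pop is not None:
--                 yield (pop, pib, pie, pjb, pje)
--             pop, pib, pie, pjb, pje = op, ib, ie, jb, je
--     if pop is not None:
--         yield (pop, pib, pie, pjb, pje)
-- ===== SOURCE B (Python) =====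
-- def merge_consecutive_edits(edits):
--     edits = list(edits)
--     n = len(edits)
--     i = 0
--     while i < n:
--         j = i + 1
--         while j < n and edits[j][1] == edits[j - 1][2] and edits[j][3] == edits[j - 1][4]:
--             j += 1
--         if j == i + 1:
--             yield edits[i]
--         else:
--             yield ('replace', edits[i][1], edits[j - 1][2], edits[i][3], edits[j - 1][4])
--         i = j
-- ===== Notes on version B (the rewrite author's own statement) =====
-- stated objective: alternative
-- what changed: Replaces A's streaming state machine (carrying a merged pending tuple pop/pib/pie/pjb/pje) with an index two-pointer scan: an inner loop advances j to the end of each maximal contiguous run, then one tuple is emitted per run (the edit itself for a singleton, a 'replace' spanning the run otherwise).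
import Mathlib
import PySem

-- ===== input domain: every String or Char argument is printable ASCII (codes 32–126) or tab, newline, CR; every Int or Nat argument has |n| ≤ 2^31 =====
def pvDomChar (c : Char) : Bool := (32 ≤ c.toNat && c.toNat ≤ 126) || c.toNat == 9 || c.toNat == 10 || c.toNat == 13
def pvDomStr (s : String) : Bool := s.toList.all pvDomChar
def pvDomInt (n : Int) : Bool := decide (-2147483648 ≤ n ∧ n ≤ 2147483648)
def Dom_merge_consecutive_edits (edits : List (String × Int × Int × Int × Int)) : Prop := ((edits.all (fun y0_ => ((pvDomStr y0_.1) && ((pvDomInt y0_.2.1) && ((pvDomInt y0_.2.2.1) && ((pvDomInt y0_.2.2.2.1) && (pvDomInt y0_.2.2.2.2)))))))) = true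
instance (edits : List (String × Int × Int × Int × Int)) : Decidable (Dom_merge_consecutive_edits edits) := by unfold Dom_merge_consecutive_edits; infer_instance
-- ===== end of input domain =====

-- ===== PORT A =====
-- A streams over the edits carrying a pending (possibly merged) tuple; each break yields it.
def mceA_loop : List (String × Int × Int × Int × Int) → Option (String × Int × Int × Int × Int) → List (String × Int × Int × Int × Int)
  | [], none => []
  | [], some p => [p]
  | (op, ib, ie, jb, je) :: rest, none => mceA_loop rest (some (op, ib, ie, jb, je))
  | (op, ib, ie, jb, je) :: rest, some (pop, pib, pie, pjb, pje) =>
    if ib = pie ∧ jb = pje then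
      mceA_loop rest (some ("replace", pib, ie, pjb, je))
    else
      (pop, pib, pie, pjb, pje) :: mceA_loop rest (some (op, ib, ie, jb, je))

def merge_consecutive_edits (edits : List (String × Int × Int × Int × Int)) : List (String × Int × Int × Int × Int) :=
  mceA_loop edits none

-- ===== PORT B =====
-- B (two-pointer): the inner j-loop of Source B — advance past the contiguous run, returning the
-- run's last element and the remaining list (pointer advance ported as list consumption).
def mceB_run : (String × Int × Int × Int × Int) → List (String × Int × Int × Int × Int) → (String × Int × Int × Int × Int) × List (String × Int × Int × Int × Int)
  | prev, [] => (prev, [])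
  | (pop, pib, pie, pjb, pje), (op, ib, ie, jb, je) :: rest =>
    if ib = pie ∧ jb = pje then mceB_run (op, ib, ie, jb, je) rest
    else ((pop, pib, pie, pjb, pje), (op, ib, ie, jb, je) :: rest)

theorem mceB_run_len : ∀ (prev : String × Int × Int × Int × Int) (l : List (String × Int × Int × Int × Int)), (mceB_run prev l).2.length ≤ l.length := by
  intro prev l
  induction l generalizing prev with
  | nil => simp [mceB_run]
  | cons f rest ih =>
    obtain ⟨pop, pib, pie, pjb, pje⟩ := prev
    obtain ⟨op, ib, ie, jb, je⟩ := f
    simp only [mceB_run]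
    split
    · exact Nat.le_trans (ih _) (Nat.le_succ _)
    · simp

-- the outer i-loop of Source B: emit the first edit unchanged (j = i+1) or one 'replace' per run.
def mceB : List (String × Int × Int × Int × Int) → List (String × Int × Int × Int × Int)
  | [] => []
  | [e] => [e]
  | (op, ib, ie, jb, je) :: (op2, ib2, ie2, jb2, je2) :: rest2 =>
    if ib2 = ie ∧ jb2 = je then
      let p := mceB_run (op2, ib2, ie2, jb2, je2) rest2
      ("replace", ib, p.1.2.2.1, jb, p.1.2.2.2.2) :: mceB p.2
    else (op, ib, ie, jb, je) :: mceB ((op2, ib2, ie2, jb2, je2) :: rest2)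
  termination_by l => l.length
  decreasing_by
  · exact Nat.lt_succ_of_lt (Nat.lt_succ_of_le (mceB_run_len _ _))
  · simp

def merge_consecutive_edits_alt (edits : List (String × Int × Int × Int × Int)) : List (String × Int × Int × Int × Int) :=
  mceB edits

-- ===== PRECONDITION & SPEC =====
def Spec_merge_consecutive_edits (edits : List (String × Int × Int × Int × Int)) (out : List (String × Int × Int × Int × Int)) : Prop := out = merge_consecutive_edits_alt edits
instance (edits : List (String × Int × Int × Int × Int)) (out : List (String × Int × Int × Int × Int)) : Decidable (Spec_merge_consecutive_edits edits out) := by unfold Spec_merge_consecutive_edits; infer_instance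

-- ===== CLAIM (what is proved, stated in full; the proofs are below) =====
def Claim_equal_merge_consecutive_edits : Prop := ∀ (edits : List (String × Int × Int × Int × Int)), Dom_merge_consecutive_edits edits → Spec_merge_consecutive_edits edits (merge_consecutive_edits edits)

-- ===== LEMMAS AND PROOFS =====

-- Invariant: once A carries a pending tuple e, its remaining output equals B run on e :: l;
-- the auxiliary statement tracks A inside a run, whose pending tuple is the merged 'replace'.
theorem mceA_some_eq_mceB : ∀ (n : Nat) (l : List (String × Int × Int × Int × Int)), l.length ≤ n → ∀ (e : String × Int × Int × Int × Int), mceA_loop l (some e) = mceB (e :: l) := by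
  intro n
  induction n with
  | zero =>
    intro l hl e
    have : l = [] := List.length_eq_zero_iff.mp (Nat.le_zero.mp hl)
    subst this
    obtain ⟨op, ib, ie, jb, je⟩ := e
    simp [mceA_loop, mceB]
  | succ n ih =>
    -- inner-run lemma, available for lists of length ≤ n + 1 given ih
    have run : ∀ (rest : List (String × Int × Int × Int × Int)), rest.length ≤ n →
        ∀ (prev : String × Int × Int × Int × Int) (a b : Int),
        mceA_loop rest (some ("replace", a, prev.2.2.1, b, prev.2.2.2.2)) =
          ("replace", a, (mceB_run prev rest).1.2.2.1, b, (mceB_run prev rest).1.2.2.2.2) :: mceB (mceB_run prev rest).2 := by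
      intro rest
      induction rest with
      | nil =>
        intro _ prev a b
        obtain ⟨pop, pib, pie, pjb, pje⟩ := prev
        simp [mceA_loop, mceB_run, mceB]
      | cons g r ihr =>
        intro hlen prev a b
        obtain ⟨pop, pib, pie, pjb, pje⟩ := prev
        obtain ⟨op, ib, ie, jb, je⟩ := g
        simp only [mceA_loop, mceB_run]
        split
        · exact ihr (Nat.le_of_succ_le (by simpa using hlen)) (op, ib, ie, jb, je) a b
        · have : mceA_loop r (some (op, ib, ie, jb, je)) = mceB ((op, ib, ie, jb, je) :: r) :=
            ih r (Nat.le_of_succ_le (by simpa using hlen)) _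
          simp [this]
    intro l hl e
    cases l with
    | nil =>
      obtain ⟨op, ib, ie, jb, je⟩ := e
      simp [mceA_loop, mceB]
    | cons f rest =>
      obtain ⟨op, ib, ie, jb, je⟩ := e
      obtain ⟨op2, ib2, ie2, jb2, je2⟩ := f
      simp only [mceA_loop, mceB]
      split
      · have hr := run rest (Nat.le_of_succ_le_succ hl) (op2, ib2, ie2, jb2, je2) ib jb
        simpa using hr
      · have := ih rest (Nat.le_of_succ_le_succ hl) (op2, ib2, ie2, jb2, je2)
        simp [this]

-- ===== VERDICT (by name: the statement is the Claim_ definition above) =====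
theorem merge_consecutive_edits_spec : Claim_equal_merge_consecutive_edits := by
  intro edits _
  unfold Spec_merge_consecutive_edits merge_consecutive_edits merge_consecutive_edits_alt
  cases edits with
  | nil => simp [mceA_loop, mceB]
  | cons e rest =>
    obtain ⟨op, ib, ie, jb, je⟩ := e
    simp only [mceA_loop]
    exact mceA_some_eq_mceB rest.length rest (Nat.le_refl _) _
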